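-- pv_equiv track=rewrite | github.com/caerlorn/crypto | 02/asn1_encoder.py | intToBytestring
-- ===== SOURCE A (Python) =====
-- def intToBytestring(i):
--     s = ''
--     if not i:
--         return chr(0x00)
--     else:
--         while i > 0:
--             s = chr(i & 0xff) + s
--             i = i >> 8
--         return s
-- ===== SOURCE B (Python) =====
-- def intToBytestring(i):
--     n = (i.bit_length() + 7) // 8 or 1
--     return ''.join(map(chr, i.to_bytes(n, 'big')))
-- ===== Notes on version B (the rewrite author's own statement) =====
-- stated objective: idiomatic
-- what changed: Replaces the while-loop that peels low bytes and prepends to a growing string with a byte count computed from bit_length and a single int.to_bytes(n,'big') call; Pre_ excludes negative i, on which A's while loop never runs and it falls through returning the empty string (an accidental leftover of the loop state) while B's to_bytes raises OverflowError.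
-- outside the precondition, e.g. on intToBytestring(-5): A returns '', B raises OverflowError
import Mathlib
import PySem

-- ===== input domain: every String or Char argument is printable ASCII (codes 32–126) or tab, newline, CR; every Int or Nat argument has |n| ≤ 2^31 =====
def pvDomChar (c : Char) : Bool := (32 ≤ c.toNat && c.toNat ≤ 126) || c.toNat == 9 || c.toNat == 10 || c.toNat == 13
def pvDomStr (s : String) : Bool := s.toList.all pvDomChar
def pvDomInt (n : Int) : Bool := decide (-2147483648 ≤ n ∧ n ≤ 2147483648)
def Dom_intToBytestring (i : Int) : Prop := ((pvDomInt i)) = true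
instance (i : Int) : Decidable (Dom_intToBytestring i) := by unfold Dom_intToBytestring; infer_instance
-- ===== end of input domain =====

-- B replaces A's low-byte-peeling while-loop with string prepend by a byte count from
-- bit_length and one int.to_bytes(n,'big') call (idiomatic); negative i are excluded by Pre_
-- (A falls through to '', B's to_bytes raises there).


-- ===== PORT A =====
-- the while loop; the accumulated Python string is carried as its List Char (chr(i & 0xff) + s = cons)
def intToBytestringLoop (i : Int) (s : List Char) : List Char :=
  if 0 < i then
    intToBytestringLoop (i >>> (8:Nat)) (Char.ofNat (PySem.Int.band i 255).toNat :: s)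
  else s
termination_by i.toNat
decreasing_by
  rename_i h
  rcases Int.eq_ofNat_of_zero_le (le_of_lt h) with ⟨m, rfl⟩
  have he : ((m:Int) >>> (8:Nat)) = ((m >>> 8 : Nat) : Int) := by
    exact_mod_cast (Int.natCast_shiftRight m 8).symm
  rw [he]
  simp only [Int.toNat_natCast, Nat.shiftRight_eq_div_pow]
  omega

def intToBytestring (i : Int) : String :=
  if i == 0 then String.ofList [Char.ofNat 0]
  else String.ofList (intToBytestringLoop i [])

-- ===== PORT B =====
-- Lean rendition of Python's i.to_bytes(n, 'big'): the n big-endian base-256 digits of m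
def pvToBytesBE (m n : Nat) : List Char :=
  match n with
  | 0 => []
  | n + 1 => pvToBytesBE (m / 256) n ++ [Char.ofNat (m % 256)]

def intToBytestring_alt (i : Int) : String :=
  let n0 := (PySem.Int.bitLength i + 7) / 8
  let n := if n0 = 0 then 1 else n0          -- "… or 1"
  String.ofList (pvToBytesBE i.toNat n)      -- i.to_bytes(n, 'big'); raises in Python for i < 0 (outside Pre_)

-- ===== PRECONDITION & SPEC =====
-- Pre_ excludes negative i: there A's while loop never runs and it falls through returning
-- the empty string (an accidental leftover of the initial loop state), while B's to_bytes raises.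
def Pre_intToBytestring (i : Int) : Prop := 0 ≤ i
instance (i : Int) : Decidable (Pre_intToBytestring i) := by unfold Pre_intToBytestring; infer_instance
def pvWitness_intToBytestring : Int := (5)

def Spec_intToBytestring (i : Int) (out : String) : Prop := out = intToBytestring_alt i
instance (i : Int) (out : String) : Decidable (Spec_intToBytestring i out) := by unfold Spec_intToBytestring; infer_instance

-- ===== CLAIM (what is proved, stated in full; the proofs are below) =====
def Claim_equal_intToBytestring : Prop := ∀ (i : Int), Dom_intToBytestring i → Pre_intToBytestring i → Spec_intToBytestring i (intToBytestring i)

-- ===== LEMMAS AND PROOFS =====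

-- the big-endian byte string of m as A's loop produces it, low byte last
def pvChunks (m : Nat) : List Char :=
  if m = 0 then [] else pvChunks (m / 256) ++ [Char.ofNat (m % 256)]
termination_by m
decreasing_by rename_i h; omega

theorem pv_shift_natCast (m k : Nat) : ((m:Int) >>> k) = ((m >>> k : Nat) : Int) := by
  exact_mod_cast (Int.natCast_shiftRight m k).symm

theorem pv_band255_natCast (m : Nat) : (PySem.Int.band (m:Int) 255).toNat = m % 256 := by
  have h : ((255:Nat):Int) = (255:Int) := by norm_num
  rw [← h, PySem.Int.band_natCast]
  have := Nat.and_two_pow_sub_one_eq_mod m 8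
  norm_num at this ⊢
  omega

theorem pv_loop_eq (m : Nat) : ∀ s, intToBytestringLoop (m:Int) s = pvChunks m ++ s := by
  induction m using Nat.strong_induction_on with
  | _ m ih =>
    intro s
    by_cases h0 : m = 0
    · subst h0
      rw [intToBytestringLoop, pvChunks]
      simp
    · rw [intToBytestringLoop, pvChunks]
      have hpos : (0:Int) < (m:Int) := by exact_mod_cast Nat.pos_of_ne_zero h0
      rw [if_pos hpos, if_neg h0]
      rw [pv_shift_natCast, pv_band255_natCast]
      have hsh : m >>> 8 = m / 256 := by simp [Nat.shiftRight_eq_div_pow]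
      rw [hsh, ih (m / 256) (by omega)]
      simp

-- when n is exactly the byte count of m, to_bytes and A's chunk list agree
theorem pv_toBytes_eq_chunks (n : Nat) : ∀ m : Nat, 256 ^ n ≤ m → m < 256 ^ (n + 1) →
    pvToBytesBE m (n + 1) = pvChunks m := by
  induction n with
  | zero =>
    intro m h1 h2
    simp at h1 h2
    rw [pvToBytesBE, pvToBytesBE, pvChunks, if_neg (by omega : ¬ m = 0), pvChunks, if_pos (by omega : m / 256 = 0)]
  | succ n ih =>
    intro m h1 h2
    have hm0 : m ≠ 0 := by
      have : 0 < 256 ^ (n+1) := Nat.pow_pos (by norm_num)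
      omega
    rw [pvToBytesBE]
    have hdiv1 : 256 ^ n ≤ m / 256 := by
      rw [Nat.le_div_iff_mul_le (by norm_num)]
      calc 256 ^ n * 256 = 256 ^ (n+1) := by ring
        _ ≤ m := h1
    have hdiv2 : m / 256 < 256 ^ (n + 1) := by
      rw [Nat.div_lt_iff_lt_mul (by norm_num)]
      calc m < 256 ^ (n+2) := h2
        _ = 256 ^ (n+1) * 256 := by ring
    rw [ih (m / 256) hdiv1 hdiv2]
    conv_rhs => rw [pvChunks]
    rw [if_neg hm0]

theorem pv_bitLength_bounds (m : Nat) (h : m ≠ 0) :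
    2 ^ (PySem.Int.bitLength (m:Int) - 1) ≤ m ∧ m < 2 ^ PySem.Int.bitLength (m:Int) := by
  have h1 := PySem.Int.lt_two_pow_bitLength (m:Int)
  have h2 := PySem.Int.two_pow_bitLength_le (m:Int) (by exact_mod_cast h)
  simp [Int.natAbs_natCast] at h1 h2
  exact ⟨h2, h1⟩

-- ===== VERDICT (by name: the statement is the Claim_ definition above) =====
theorem intToBytestring_spec : Claim_equal_intToBytestring := by
  intro i _ hpre
  unfold Spec_intToBytestring intToBytestring intToBytestring_alt
  rcases Int.eq_ofNat_of_zero_le hpre with ⟨m, rfl⟩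
  by_cases h0 : m = 0
  · subst h0
    simp [pvToBytesBE, PySem.Int.bitLength_zero]
  · have hne : ¬ (((m:Int) == 0) = true) := by
      simp
      exact_mod_cast h0
    rw [if_neg hne, pv_loop_eq m []]
    simp only [List.append_nil, Int.toNat_natCast]
    obtain ⟨hlo, hhi⟩ := pv_bitLength_bounds m h0
    generalize hbg : PySem.Int.bitLength (m:Int) = b at hlo hhi ⊢
    have hb1 : 1 ≤ b := by
      by_contra hc
      have hz : b = 0 := by omega
      rw [hz] at hhi
      simp at hhi
      omega
    have hn0 : (b + 7) / 8 ≠ 0 := by omega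
    rw [if_neg hn0]
    obtain ⟨n', hn'⟩ : ∃ n', (b + 7) / 8 = n' + 1 := ⟨(b + 7) / 8 - 1, by omega⟩
    rw [hn']
    have hA : 256 ^ n' ≤ m := by
      calc 256 ^ n' = 2 ^ (8 * n') := by rw [pow_mul]; norm_num
        _ ≤ 2 ^ (b - 1) := Nat.pow_le_pow_right (by norm_num) (by omega)
        _ ≤ m := hlo
    have hB : m < 256 ^ (n' + 1) := by
      calc m < 2 ^ b := hhi
        _ ≤ 2 ^ (8 * (n' + 1)) := Nat.pow_le_pow_right (by norm_num) (by omega)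
        _ = 256 ^ (n' + 1) := by rw [pow_mul]; norm_num
    rw [pv_toBytes_eq_chunks n' m hA hB]
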